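-- pv_equiv track=rewrite | github.com/SpikeKing/CRAFT-Re-reimplementation | ds_scripts/sample_labeled_parser.py | split_boxes
-- ===== SOURCE A (Python) =====
-- def split_boxes(pnt_list, box):
--     """
--     根据点列表拆分box
--     """
--     if not pnt_list:
--         return [box]
--     x_min, y_min, x_max, y_max = box
--     x_list = []
--     for pnt in pnt_list:
--         x_list.append(pnt[0])
--     x_list = sorted(x_list)
--     sub_boxes = []
--     x_s = x_min
--     for x in x_list:
--         sub_boxes.append([x_s, y_min, x, y_max])
--         x_s = x
--     sub_boxes.append([x_s, y_min, x_max, y_max])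
--     return sub_boxes
-- ===== SOURCE B (Python) =====
-- def split_boxes(pnt_list, box):
--     if not pnt_list:
--         return [box]
--     x_min, y_min, x_max, y_max = box
--     xs = [p[0] for p in pnt_list]
--     sub_boxes = []
--     hi = x_max
--     while xs:
--         x = max(xs)
--         xs.remove(x)
--         sub_boxes.append([x, y_min, hi, y_max])
--         hi = x
--     sub_boxes.append([x_min, y_min, hi, y_max])
--     sub_boxes.reverse()
--     return sub_boxes
-- ===== Notes on version B (the rewrite author's own statement) =====
-- stated objective: alternative
-- what changed: Drops the sort entirely: B builds the result back-to-front by repeatedly extracting the maximum split x (selection-style max/remove loop), shrinking the box's right edge each step, and reversing at the end, instead of sorting the x-coordinates and threading a previous-x accumulator left to right.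
import Mathlib
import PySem

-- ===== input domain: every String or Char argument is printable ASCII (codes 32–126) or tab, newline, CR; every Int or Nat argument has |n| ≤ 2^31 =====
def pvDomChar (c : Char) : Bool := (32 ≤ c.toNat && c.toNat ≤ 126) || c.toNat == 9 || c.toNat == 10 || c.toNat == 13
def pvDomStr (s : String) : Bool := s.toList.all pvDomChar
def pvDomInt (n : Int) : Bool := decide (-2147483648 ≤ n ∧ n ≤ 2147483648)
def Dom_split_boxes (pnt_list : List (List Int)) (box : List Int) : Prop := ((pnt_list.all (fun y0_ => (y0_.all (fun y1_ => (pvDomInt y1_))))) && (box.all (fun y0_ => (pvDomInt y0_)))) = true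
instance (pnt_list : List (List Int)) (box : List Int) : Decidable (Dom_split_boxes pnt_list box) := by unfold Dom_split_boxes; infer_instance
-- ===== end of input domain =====

-- B drops the sort: it extracts the maximum split x repeatedly (max/remove loop),
-- building the sub-boxes back-to-front while shrinking the right edge, then reverses.

-- ===== PORT A =====
def split_boxes (pnt_list : List (List Int)) (box : List Int) : List (List Int) :=
  if pnt_list = [] then [box]
  else match box with
  | [x_min, y_min, x_max, y_max] =>
    -- x_list built by appending pnt[0] for each pnt, then sorted
    let x_list := pnt_list.foldl (fun acc pnt => acc ++ [(PySem.List.pyGet? pnt 0).getD 0]) []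
    let x_list := PySem.List.sorted x_list (fun x => x) false
    -- loop threading x_s, then the trailing append
    let st := x_list.foldl
      (fun (st : List (List Int) × Int) x => (st.1 ++ [[st.2, y_min, x, y_max]], x))
      ([], x_min)
    st.1 ++ [[st.2, y_min, x_max, y_max]]
  | _ => []  -- unreachable under Pre_ (Python raises ValueError here)

-- ===== PORT B =====
-- the 'while xs:' loop of Source B: pop the maximum, append a box, shrink the right edge.
-- fuel = initial length of xs makes the recursion structural; it never runs out,
-- since each iteration removes one element.
def pvPeel (y_min y_max : Int) : Nat → List Int → List (List Int) → Int → List (List Int) × Int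
  | 0, _, out, hi => (out, hi)
  | fuel + 1, xs, out, hi =>
    match PySem.List.max? xs (fun y => y) with
    | none => (out, hi)   -- xs is empty: the while loop stops
    | some x =>
      pvPeel y_min y_max fuel ((PySem.List.remove? xs x).getD [])
        (out ++ [[x, y_min, hi, y_max]]) x

def split_boxes_alt (pnt_list : List (List Int)) (box : List Int) : List (List Int) :=
  if pnt_list = [] then [box]
  else if box.length = 4 then
    -- box unpacking 'x_min, y_min, x_max, y_max = box'
    let x_min := (PySem.List.pyGet? box 0).getD 0
    let y_min := (PySem.List.pyGet? box 1).getD 0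
    let x_max := (PySem.List.pyGet? box 2).getD 0
    let y_max := (PySem.List.pyGet? box 3).getD 0
    let xs := pnt_list.map (fun p => (PySem.List.pyGet? p 0).getD 0)
    let st := pvPeel y_min y_max xs.length xs [] x_max
    (st.1 ++ [[x_min, y_min, st.2, y_max]]).reverse
  else []  -- unreachable under Pre_ (Python raises ValueError here)

-- ===== PRECONDITION & SPEC =====
-- Pre_ excludes only inputs on which A raises: with a nonempty pnt_list the Python
-- unpacking 'x_min, y_min, x_max, y_max = box' raises unless box has exactly 4
-- elements, and 'pnt[0]' raises IndexError on an empty point (B raises there too).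
def Pre_split_boxes (pnt_list : List (List Int)) (box : List Int) : Prop :=
  pnt_list = [] ∨ (box.length = 4 ∧ ∀ p ∈ pnt_list, p ≠ [])
instance (pnt_list : List (List Int)) (box : List Int) : Decidable (Pre_split_boxes pnt_list box) := by unfold Pre_split_boxes; infer_instance
def pvWitness_split_boxes : List (List Int) × List Int := ([[3, 0], [1, 9]], [0, 0, 10, 20])
def Spec_split_boxes (pnt_list : List (List Int)) (box : List Int) (out : List (List Int)) : Prop := out = split_boxes_alt pnt_list box
instance (pnt_list : List (List Int)) (box : List Int) (out : List (List Int)) : Decidable (Spec_split_boxes pnt_list box out) := by unfold Spec_split_boxes; infer_instance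

-- ===== CLAIM (what is proved, stated in full; the proofs are below) =====
def Claim_equal_split_boxes : Prop := ∀ (pnt_list : List (List Int)) (box : List Int), Dom_split_boxes pnt_list box → Pre_split_boxes pnt_list box → Spec_split_boxes pnt_list box (split_boxes pnt_list box)

-- ===== LEMMAS AND PROOFS =====

-- common reference shape: boxes pairing consecutive boundaries a :: l
def pvPr (y_min y_max a : Int) : List Int → List (List Int)
  | [] => []
  | b :: t => [a, y_min, b, y_max] :: pvPr y_min y_max b t

-- what pvPeel produces from a DESCENDING list t (proof-side mirror of the loop)
def pvG (y_min y_max : Int) : List Int → Int → List (List Int) × Int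
  | [], hi => ([], hi)
  | m :: t, hi =>
    let r := pvG y_min y_max t m
    ([[m, y_min, hi, y_max]] ++ r.1, r.2)

-- A's first loop (append pnt[0] one by one) builds exactly the map of pnt[0].
theorem foldl_append_eq_map (f : List Int → Int) :
    ∀ (xs : List (List Int)) (acc : List Int),
      xs.foldl (fun acc p => acc ++ [f p]) acc = acc ++ xs.map f := by
  intro xs
  induction xs with
  | nil => simp
  | cons x xs ih => intro acc; simp [List.foldl, ih]

-- A's second loop, unrolled: threading x_s through xs and appending the tail box
-- equals pvPr x_s (xs ++ [x_max]).
theorem thread_eq_pr (y_min y_max x_max : Int) :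
    ∀ (xs : List Int) (acc : List (List Int)) (x_s : Int),
      (xs.foldl (fun (st : List (List Int) × Int) x => (st.1 ++ [[st.2, y_min, x, y_max]], x)) (acc, x_s)).1
        ++ [[(xs.foldl (fun (st : List (List Int) × Int) x => (st.1 ++ [[st.2, y_min, x, y_max]], x)) (acc, x_s)).2, y_min, x_max, y_max]]
      = acc ++ pvPr y_min y_max x_s (xs ++ [x_max]) := by
  intro xs
  induction xs with
  | nil => intro acc x_s; simp [pvPr]
  | cons x xs ih =>
    intro acc x_s
    simp only [List.foldl, List.cons_append, pvPr]
    rw [ih]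
    simp

theorem pr_snoc (y_min y_max : Int) :
    ∀ (l : List Int) (a b c : Int),
      pvPr y_min y_max a (l ++ [b] ++ [c]) = pvPr y_min y_max a (l ++ [b]) ++ [[b, y_min, c, y_max]] := by
  intro l
  induction l with
  | nil => intro a b c; simp [pvPr]
  | cons x l ih => intro a b c; simp only [List.cons_append, pvPr, ih]

-- reversing pvG's back-to-front output gives the forward pairing
theorem g_bridge (y_min y_max x_min : Int) :
    ∀ (t : List Int) (hi : Int),
      ((pvG y_min y_max t hi).1 ++ [[x_min, y_min, (pvG y_min y_max t hi).2, y_max]]).reverse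
        = pvPr y_min y_max x_min (t.reverse ++ [hi]) := by
  intro t
  induction t with
  | nil => intro hi; simp [pvG, pvPr]
  | cons m t ih =>
    intro hi
    simp only [pvG, List.reverse_cons]
    rw [List.append_assoc, List.reverse_append, ih m]
    simp only [List.reverse_cons, List.reverse_nil, List.nil_append, pr_snoc]

-- extracting the first maximum splits the sorted order at its right end
theorem sorted_decomp (xs : List Int) (m : Int)
    (hmax : PySem.List.max? xs (fun y => y) = some m) :
    PySem.List.sorted xs (fun y => y) false
      = PySem.List.sorted (xs.erase m) (fun y => y) false ++ [m] := by
  have hm : m ∈ xs := PySem.List.max?_mem hmax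
  apply PySem.List.sorted_id_eq_of_perm_of_pairwise
  · exact (((PySem.List.sorted_perm (xs.erase m) (fun y => y) false).append_right [m]).trans
      (List.perm_append_singleton m (xs.erase m))).trans (List.perm_cons_erase hm).symm
  · rw [List.pairwise_append]
    refine ⟨PySem.List.sorted_pairwise _ _, List.pairwise_singleton _ _, ?_⟩
    intro a ha b hb
    rw [List.mem_singleton] at hb
    subst hb
    exact PySem.List.max?_isMax hmax a (List.mem_of_mem_erase ((PySem.List.mem_sorted _ _ _ _).1 ha))

-- loop invariant: with enough fuel, the max/remove loop produces pvG of the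
-- descending (reversed sorted) list of xs
theorem peel_char (y_min y_max : Int) :
    ∀ (fuel : Nat) (xs : List Int), xs.length ≤ fuel → ∀ (out : List (List Int)) (hi : Int),
      pvPeel y_min y_max fuel xs out hi
        = (out ++ (pvG y_min y_max ((PySem.List.sorted xs (fun y => y) false).reverse) hi).1,
           (pvG y_min y_max ((PySem.List.sorted xs (fun y => y) false).reverse) hi).2) := by
  intro fuel
  induction fuel with
  | zero =>
    intro xs hlen out hi
    have : xs = [] := List.eq_nil_of_length_eq_zero (Nat.le_zero.1 hlen)
    subst this
    simp [pvPeel, PySem.List.sorted, pvG]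
  | succ fuel ih =>
    intro xs hlen out hi
    cases hmax : PySem.List.max? xs (fun y => y) with
    | none =>
      have : xs = [] := (PySem.List.max?_eq_none_iff _ _).1 hmax
      subst this
      simp [pvPeel, hmax, PySem.List.sorted, pvG]
    | some m =>
      have hm : m ∈ xs := PySem.List.max?_mem hmax
      have hrem : PySem.List.remove? xs m = some (xs.erase m) :=
        PySem.List.remove?_eq_some_erase xs m hm
      have hlen' : (xs.erase m).length ≤ fuel := by
        have := List.length_erase_of_mem hm
        have hpos : 0 < xs.length := List.length_pos_of_mem hm
        omega
      have hsort := sorted_decomp xs m hmax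
      simp only [pvPeel, hmax, hrem, Option.getD_some]
      rw [ih _ hlen', hsort]
      simp [pvG]

-- ===== VERDICT (by name: the statement is the Claim_ definition above) =====
theorem split_boxes_spec : Claim_equal_split_boxes := by
  unfold Claim_equal_split_boxes
  intro pnt_list box _ _
  unfold Spec_split_boxes split_boxes split_boxes_alt
  by_cases h : pnt_list = []
  · simp [h]
  · simp only [if_neg h]
    match box with
    | [x_min, y_min, x_max, y_max] =>
      have e0 : (PySem.List.pyGet? ([x_min, y_min, x_max, y_max] : List Int) 0).getD 0 = x_min := rfl
      have e1 : (PySem.List.pyGet? ([x_min, y_min, x_max, y_max] : List Int) 1).getD 0 = y_min := rfl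
      have e2 : (PySem.List.pyGet? ([x_min, y_min, x_max, y_max] : List Int) 2).getD 0 = x_max := rfl
      have e3 : (PySem.List.pyGet? ([x_min, y_min, x_max, y_max] : List Int) 3).getD 0 = y_max := rfl
      simp only [List.length_cons, List.length_nil, e0, e1, e2, e3, foldl_append_eq_map,
        List.nil_append, if_pos]
      rw [thread_eq_pr y_min y_max x_max _ [] x_min,
        peel_char y_min y_max _ _ (le_refl _) [] x_max]
      simp only [List.nil_append]
      rw [g_bridge y_min y_max x_min _ x_max]
      simp
    | [] => rfl
    | [_] => rfl
    | [_, _] => rfl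
    | [_, _, _] => rfl
    | _ :: _ :: _ :: _ :: _ :: _ =>
      simp [List.length_cons]
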